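-- pv_equiv track=rewrite | github.com/m38109/Reasoning_and_Intelligent_Systems_Group_Project | main.py | count_row_conflicts
-- ===== SOURCE A (Python) =====
-- def count_row_conflicts(grid):
--     count_conflicts = 0
--     for row in grid:
--         letter_counts = {}  # Dictionary to count letter occurrences
--         for letter in row:
--             if letter:  # Ignore empty cells
--                 if letter in letter_counts:
--                     count_conflicts += 1  # Increase conflict count for duplicates
--                 else:
--                     letter_counts[letter] = 1  # First occurrence of letter
--     return count_conflicts
-- ===== SOURCE B (Python) =====
-- def count_row_conflicts(grid):
--     total = 0
--     for row in grid:
--         cells = sorted(c for c in row if c)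
--         total += sum(1 for a, b in zip(cells, cells[1:]) if a == b)
--     return total
-- ===== Notes on version B (the rewrite author's own statement) =====
-- stated objective: alternative
-- what changed: Sort-then-scan: per row B sorts the non-empty cells and counts adjacent equal pairs in the sorted list, instead of A's per-element seen-before dictionary test.
import Mathlib
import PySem

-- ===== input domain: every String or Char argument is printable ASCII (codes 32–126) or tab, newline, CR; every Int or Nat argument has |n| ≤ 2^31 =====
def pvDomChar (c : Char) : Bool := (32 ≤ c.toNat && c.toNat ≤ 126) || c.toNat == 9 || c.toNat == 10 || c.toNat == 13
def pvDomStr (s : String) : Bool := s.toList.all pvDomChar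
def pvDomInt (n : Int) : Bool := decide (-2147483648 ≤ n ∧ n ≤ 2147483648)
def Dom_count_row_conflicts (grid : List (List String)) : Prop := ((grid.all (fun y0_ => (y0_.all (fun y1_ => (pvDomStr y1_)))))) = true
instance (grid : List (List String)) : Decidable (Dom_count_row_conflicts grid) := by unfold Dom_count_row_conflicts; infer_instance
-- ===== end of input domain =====

-- B sorts each row's non-empty cells and counts adjacent equal pairs instead of A's
-- per-element seen-before dictionary test; objective: alternative algorithm.

-- ===== PORT A =====
def count_row_conflicts (grid : List (List String)) : Int :=
  grid.foldl
    (fun count_conflicts row =>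
      (row.foldl
        (fun (st : PySem.Dict String Int × Int) letter =>
          if letter ≠ "" then               -- if letter: (string truthiness)
            if st.1.contains letter then (st.1, st.2 + 1)
            else (st.1.insert letter 1, st.2)
          else st)
        (PySem.Dict.empty, count_conflicts)).2)
    0

-- ===== PORT B =====
def count_row_conflicts_alt (grid : List (List String)) : Int :=
  grid.foldl
    (fun total row =>
      let cells := PySem.List.sorted (row.filter (fun c => c ≠ "")) (fun x => x) false
      -- zip(cells, cells[1:]): cells[1:] is exactly cells.drop 1 here
      total + (((cells.zip (cells.drop 1)).countP (fun p => p.1 == p.2) : Int)))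
    0

-- ===== PRECONDITION & SPEC =====
def Spec_count_row_conflicts (grid : List (List String)) (out : Int) : Prop := out = count_row_conflicts_alt grid
instance (grid : List (List String)) (out : Int) : Decidable (Spec_count_row_conflicts grid out) := by unfold Spec_count_row_conflicts; infer_instance

-- ===== CLAIM =====
def Claim_equal_count_row_conflicts : Prop := ∀ (grid : List (List String)), Dom_count_row_conflicts grid → Spec_count_row_conflicts grid (count_row_conflicts grid)

-- ===== LEMMAS AND PROOFS =====

-- number of distinct elements of l that d does not yet contain
def pvNewCnt (d : PySem.Dict String Int) (l : List String) : Nat :=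
  (l.toFinset.filter (fun x => ¬ (d.contains x = true))).card

lemma pvNewCnt_contains (d : PySem.Dict String Int) (x : String) (l : List String)
    (h : d.contains x = true) : pvNewCnt d (x :: l) = pvNewCnt d l := by
  simp [pvNewCnt, Finset.filter_insert, h]

lemma pvNewCnt_insert (d : PySem.Dict String Int) (x : String) (l : List String)
    (h : d.contains x = false) :
    pvNewCnt d (x :: l) = pvNewCnt (d.insert x 1) l + 1 := by
  have hp : ∀ y, ((d.insert x 1).contains y = true) ↔ (y = x ∨ d.contains y = true) := by
    intro y
    simp [PySem.Dict.contains_insert]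
  have : (l.toFinset.filter (fun y => ¬ ((d.insert x 1).contains y = true)))
      = (l.toFinset.filter (fun y => ¬ (d.contains y = true))).erase x := by
    ext y
    simp only [Finset.mem_filter, Finset.mem_erase, hp]
    tauto
  have hx : ¬ (d.contains x = true) := by simp [h]
  simp only [pvNewCnt, List.toFinset_cons, Finset.filter_insert, this, if_pos hx]
  set t := l.toFinset.filter (fun y => ¬ (d.contains y = true)) with ht
  by_cases hm : x ∈ t
  · rw [Finset.card_insert_of_mem hm, Finset.card_erase_of_mem hm]
    have : 0 < t.card := Finset.card_pos.mpr ⟨x, hm⟩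
    omega
  · rw [Finset.card_insert_of_notMem hm, Finset.erase_eq_of_notMem hm]

-- invariant of A's inner loop
lemma inner_loop (row : List String) (d : PySem.Dict String Int) (c : Int) :
    (row.foldl
       (fun (st : PySem.Dict String Int × Int) letter =>
         if letter ≠ "" then
           if st.1.contains letter then (st.1, st.2 + 1)
           else (st.1.insert letter 1, st.2)
         else st)
       (d, c)).2
    = c + ((row.filter (fun s => s ≠ "")).length : Int)
        - (pvNewCnt d (row.filter (fun s => s ≠ "")) : Int) := by
  induction row generalizing d c with
  | nil => simp [pvNewCnt]
  | cons x xs ih =>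
    simp only [List.foldl_cons]
    by_cases hx : x = ""
    · rw [if_neg (by simp [hx]), List.filter_cons_of_neg (by simp [hx])]
      exact ih d c
    · rw [if_pos (by simp [hx]), List.filter_cons_of_pos (by simp [hx])]
      by_cases hc : d.contains x = true
      · rw [if_pos hc, ih, pvNewCnt_contains d x _ hc]
        push_cast [List.length_cons]
        ring
      · have hc' : d.contains x = false := by simpa using hc
        rw [if_neg hc, ih, pvNewCnt_insert d x _ hc']
        push_cast [List.length_cons]
        ring

lemma pvNewCnt_empty (l : List String) :
    pvNewCnt PySem.Dict.empty l = l.toFinset.card := by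
  simp [pvNewCnt, PySem.Dict.contains_empty]

-- adjacent-equal count of a ≤-sorted list + number of distinct = length
lemma adj_count_sorted (l : List String) (hs : l.Pairwise (· ≤ ·)) :
    (l.zip (l.drop 1)).countP (fun p => p.1 == p.2) + l.toFinset.card = l.length := by
  induction l with
  | nil => simp
  | cons x xs ih =>
    cases xs with
    | nil => simp
    | cons y ys =>
      rcases List.pairwise_cons.mp hs with ⟨h1, hs'⟩
      have ihy := ih hs'
      simp only [List.drop_succ_cons, List.drop_zero, List.zip_cons_cons,
        List.countP_cons, List.toFinset_cons, List.length_cons] at ihy ⊢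
      by_cases hxy : x = y
      · rw [Finset.insert_eq_self.mpr (by simp [hxy])]
        simp only [hxy, beq_self_eq_true, if_true]
        omega
      · have hnot : x ∉ insert y ys.toFinset := by
          simp only [Finset.mem_insert, List.mem_toFinset]
          rintro (rfl | hmem)
          · exact hxy rfl
          · rcases List.pairwise_cons.mp hs' with ⟨h2, _⟩
            exact hxy (le_antisymm (h1 y (by simp)) (h2 x hmem))
        rw [Finset.card_insert_of_notMem hnot]
        simp only [show (x == y) = false by simp [hxy], Bool.false_eq_true, if_false]
        omega

-- ===== VERDICT =====
theorem count_row_conflicts_spec : Claim_equal_count_row_conflicts := by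
  intro grid _
  unfold Spec_count_row_conflicts count_row_conflicts count_row_conflicts_alt
  have hstep :
      (fun (count_conflicts : Int) (row : List String) =>
        (row.foldl
          (fun (st : PySem.Dict String Int × Int) letter =>
            if letter ≠ "" then
              if st.1.contains letter then (st.1, st.2 + 1)
              else (st.1.insert letter 1, st.2)
            else st)
          (PySem.Dict.empty, count_conflicts)).2)
      = (fun (total : Int) (row : List String) =>
          let cells := PySem.List.sorted (row.filter (fun c => c ≠ "")) (fun x => x) false
          total + (((cells.zip (cells.drop 1)).countP (fun p => p.1 == p.2) : Int))) := by
    funext c row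
    rw [inner_loop]
    set cells0 := row.filter (fun s => s ≠ "") with hc0
    set cells := PySem.List.sorted cells0 (fun x => x) false with hc
    have hperm : cells.Perm cells0 := PySem.List.sorted_perm cells0 (fun x => x) false
    have hpw : cells.Pairwise (· ≤ ·) := by
      have := PySem.List.sorted_pairwise cells0 (fun x => x)
      simpa using this
    have hadj := adj_count_sorted cells hpw
    have hlen : cells.length = cells0.length := hperm.length_eq
    have hfs : cells.toFinset = cells0.toFinset := by
      ext z; simp [List.mem_toFinset, hperm.mem_iff]
    rw [pvNewCnt_empty]
    rw [hfs, hlen] at hadj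
    show c + (cells0.length : Int) - (cells0.toFinset.card : Int)
        = c + (((cells.zip (cells.drop 1)).countP (fun p => p.1 == p.2) : Int))
    omega
  rw [hstep]
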